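-- pv_equiv track=rewrite | github.com/TobiasSammet/pythonplayground | leet-MatrixSimilarityAfterCyclicShifts-2946.py | xareSimilar
-- ===== SOURCE A (Python) =====
-- from typing import List
--
-- def xareSimilar(mat: List[List[int]], k: int) -> bool:
--     copied_array = [row[:] for row in mat]
--     rows: int = len(mat)
--     cols: int = len(mat[0])
--
--     for i in range(k):
--         for row in range(rows):
--             if row % 2 == 0:
--                 # shift to left
--                 tempVal = mat[row][0]
--                 for col in range(cols-1):
--                     mat[row][col] = mat[row][col+1]
--                 mat[row][cols -1] = tempVal
--             else:
--                 tempVal = mat[row][cols-1]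
--                 for col in range(cols-1, 0, -1):
--                     mat[row][col] = mat[row][col-1]
--                 mat[row][0] = tempVal
--     for i in range(rows):
--         for j in range(cols):
--             if mat[i][j] != copied_array[i][j]:
--                 return False
--     return True
-- ===== SOURCE B (Python) =====
-- from typing import List
--
-- def xareSimilar(mat: List[List[int]], k: int) -> bool:
--     # A row is unchanged after k single-step cyclic shifts (left or right)
--     # iff it equals itself rotated by k % cols; check each row once.
--     cols = len(mat[0])
--     s = k % cols
--     return all(row[s:] + row[:s] == row for row in mat)
-- ===== Notes on version B (the rewrite author's own statement) =====
-- stated objective: faster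
-- what changed: Instead of simulating k single-step row shifts on the matrix and then comparing it to a copy, B reduces k modulo the column count and checks each row once against its rotation by k % cols, since a row is unchanged after k left or right unit shifts iff it equals its rotation by k % cols.
-- outside the precondition, e.g. on xareSimilar([[1, 2]], -1): A returns True, B returns False; on xareSimilar([[5, 5], [5, 5, 7]], 1): A returns True, B returns False; on xareSimilar([[]], 0): A returns True, B raises ZeroDivisionError
import Mathlib
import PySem

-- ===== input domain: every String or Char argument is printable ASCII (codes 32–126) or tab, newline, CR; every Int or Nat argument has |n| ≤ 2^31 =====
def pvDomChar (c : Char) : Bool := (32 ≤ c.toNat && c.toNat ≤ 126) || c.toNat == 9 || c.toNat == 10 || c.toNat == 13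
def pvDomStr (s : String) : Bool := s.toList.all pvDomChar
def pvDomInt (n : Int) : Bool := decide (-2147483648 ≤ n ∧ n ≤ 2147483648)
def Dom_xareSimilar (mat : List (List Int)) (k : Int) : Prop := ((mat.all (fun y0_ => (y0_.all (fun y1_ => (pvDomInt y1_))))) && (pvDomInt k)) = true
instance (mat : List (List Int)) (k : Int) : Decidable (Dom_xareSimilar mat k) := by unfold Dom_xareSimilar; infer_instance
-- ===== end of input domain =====

-- B replaces A's k-fold in-place simulation of unit row shifts by a single per-row comparison with
-- the rotation by k % cols (asymptotically fewer passes); A mutates its argument `mat` in place,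
-- B does not — the equivalence proved here is about the return value only.


-- ===== PORT A =====
-- body of A's `for row in range(rows)` loop: shift row `row` (even: left, odd: right) in place
def pvShiftRow (cols : Int) (row : Int) (r : List Int) : List Int :=
  if PySem.Int.mod row 2 == 0 then
    -- shift to left: tempVal = mat[row][0]; the col loop; mat[row][cols-1] = tempVal
    PySem.List.pySetD
      ((PySem.List.pyRange 0 (cols - 1) 1).foldl
        (fun r col => PySem.List.pySetD r col (PySem.List.pyGetD r (col + 1) 0)) r)
      (cols - 1) (PySem.List.pyGetD r 0 0)
  else
    -- shift to right: tempVal = mat[row][cols-1]; the col loop; mat[row][0] = tempVal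
    PySem.List.pySetD
      ((PySem.List.pyRange (cols - 1) 0 (-1)).foldl
        (fun r col => PySem.List.pySetD r col (PySem.List.pyGetD r (col - 1) 0)) r)
      0 (PySem.List.pyGetD r (cols - 1) 0)

def xareSimilar (mat : List (List Int)) (k : Int) : Bool :=
  let copied := mat.map (fun row => PySem.List.slice row none none)        -- [row[:] for row in mat]
  let rows : Int := PySem.List.len mat
  let cols : Int := PySem.List.len (PySem.List.pyGetD mat 0 [])
  let m := (PySem.List.pyRange 0 k 1).foldl (fun m _ =>
    (PySem.List.pyRange 0 rows 1).foldl
      (fun m row => PySem.List.pySetD m row (pvShiftRow cols row (PySem.List.pyGetD m row []))) m) mat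
  (PySem.List.pyRange 0 rows 1).all (fun i =>
    (PySem.List.pyRange 0 cols 1).all (fun j =>
      PySem.List.pyGetD (PySem.List.pyGetD m i []) j 0 ==
      PySem.List.pyGetD (PySem.List.pyGetD copied i []) j 0))

-- ===== PORT B =====
def xareSimilar_alt (mat : List (List Int)) (k : Int) : Bool :=
  let cols : Int := PySem.List.len (PySem.List.pyGetD mat 0 [])
  let s := PySem.Int.mod k cols
  mat.all (fun row =>
    PySem.List.slice row (some s) none ++ PySem.List.slice row none (some s) == row)

-- ===== PRECONDITION & SPEC =====
-- Pre_ excludes negative k (outside the natural domain of a shift count; A does nothing there and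
-- returns True) and empty or ragged matrices (A raises, or returns a value that depends only on
-- the first len(mat[0]) columns of each row).
def Pre_xareSimilar (mat : List (List Int)) (k : Int) : Prop :=
  mat ≠ [] ∧ 0 < (mat.headD []).length ∧
    (∀ row ∈ mat, row.length = (mat.headD []).length) ∧ 0 ≤ k
instance (mat : List (List Int)) (k : Int) : Decidable (Pre_xareSimilar mat k) := by
  unfold Pre_xareSimilar; infer_instance
def pvWitness_xareSimilar : List (List Int) × Int := ([[1, 2], [3, 4]], 2)

def Spec_xareSimilar (mat : List (List Int)) (k : Int) (out : Bool) : Prop := out = xareSimilar_alt mat k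
instance (mat : List (List Int)) (k : Int) (out : Bool) : Decidable (Spec_xareSimilar mat k out) := by unfold Spec_xareSimilar; infer_instance

-- ===== CLAIM (what is proved, stated in full; the proofs are below) =====
def Claim_equal_xareSimilar : Prop := ∀ (mat : List (List Int)) (k : Int), Dom_xareSimilar mat k → Pre_xareSimilar mat k → Spec_xareSimilar mat k (xareSimilar mat k)


-- ===== LEMMAS AND PROOFS =====

-- apply g to each row together with its absolute index
def pvApplyIdx (g : Int → List Int → List Int) : Int → List (List Int) → List (List Int)
  | _, [] => []
  | i, r :: t => g i r :: pvApplyIdx g (i + 1) t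

-- what K passes of A's shifting loop do to the matrix: rotate row i left by K (even i) or by K*(c-1) (odd i)
def pvRotIdx (K c : Nat) : Int → List (List Int) → List (List Int)
  | _, [] => []
  | i, r :: t =>
      r.rotate (K * (if PySem.Int.mod i 2 == 0 then 1 else c - 1)) :: pvRotIdx K c (i + 1) t

-- A's even-row inner loop: after the first j writes the row is (r.drop 1).take j ++ r.drop j
theorem pvEvenFold (j : Nat) (r : List Int) (hj : j + 1 ≤ r.length) :
    (PySem.List.pyRange 0 (j : Int) 1).foldl
      (fun r col => PySem.List.pySetD r col (PySem.List.pyGetD r (col + 1) 0)) r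
      = (r.drop 1).take j ++ r.drop j := by
  induction j with
  | zero => simp [PySem.List.pyRange_one_eq_nil]
  | succ j ih =>
    rw [show ((j + 1 : Nat) : Int) = (j : Int) + 1 by push_cast; ring,
        PySem.List.pyRange_one_succ_right (by positivity), List.foldl_append]
    rw [ih (by omega), List.foldl_cons, List.foldl_nil]
    rw [show ((j : Int) + 1) = ((j + 1 : Nat) : Int) by push_cast; ring]
    rw [PySem.List.pySetD_natCast, PySem.List.pyGetD_natCast]
    have hT : ((r.drop 1).take j).length = j := by simp; omega
    have hdrop : r.drop j = r[j]'(by omega) :: r.drop (j + 1) :=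
      List.drop_eq_getElem_cons (by omega)
    have hget : ((r.drop 1).take j ++ r.drop j).getD (j + 1) 0 = r[j + 1]'(by omega) := by
      rw [hdrop, List.getD_eq_getElem?_getD, List.getElem?_append_right (by omega), hT,
          show j + 1 - j = 1 by omega, List.getElem?_cons_succ, List.getElem?_drop,
          List.getElem?_eq_getElem (by omega)]
      simp
    rw [hget, hdrop]
    rw [List.take_succ_eq_append_getElem (by simp; omega)]
    have hgd : (r.drop 1)[j]'(by simp; omega) = r[j + 1]'(by omega) := by
      simp
    rw [hgd]
    rw [List.set_append, hT, if_neg (lt_irrefl j), Nat.sub_self, List.set_cons_zero]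
    simp [List.append_assoc]

-- A's odd-row inner loop, processed downwards from column j
theorem pvOddFold (c : Nat) (j : Nat) (r : List Int) (hr : r.length = c) (hj : j + 1 ≤ c) :
    (PySem.List.pyRange (j : Int) 0 (-1)).foldl
      (fun r col => PySem.List.pySetD r col (PySem.List.pyGetD r (col - 1) 0))
      (r.take (j + 1) ++ (r.take (c - 1)).drop j)
      = r.take 1 ++ r.take (c - 1) := by
  induction j with
  | zero => simp [PySem.List.pyRange_neg_one_eq_nil]
  | succ j ih =>
    rw [PySem.List.pyRange_neg_one_cons (by positivity), List.foldl_cons]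
    have hstep :
        PySem.List.pySetD (r.take (j + 1 + 1) ++ (r.take (c - 1)).drop (j + 1))
          ((j + 1 : Nat) : Int)
          (PySem.List.pyGetD (r.take (j + 1 + 1) ++ (r.take (c - 1)).drop (j + 1))
            (((j + 1 : Nat) : Int) - 1) 0)
        = r.take (j + 1) ++ (r.take (c - 1)).drop j := by
      rw [show (((j + 1 : Nat) : Int) - 1) = ((j : Nat) : Int) by push_cast; ring]
      rw [PySem.List.pySetD_natCast, PySem.List.pyGetD_natCast]
      have htk : (r.take (j + 1 + 1)).length = j + 2 := by simp; omega
      have hget : (r.take (j + 1 + 1) ++ (r.take (c - 1)).drop (j + 1)).getD j 0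
          = r[j]'(by omega) := by
        rw [List.getD_eq_getElem?_getD, List.getElem?_append_left (by rw [htk]; omega),
            List.getElem?_take_of_lt (by omega), List.getElem?_eq_getElem (by omega)]
        simp
      rw [hget]
      rw [List.set_append, htk, if_pos (by omega)]
      rw [List.take_succ_eq_append_getElem (by omega)]
      rw [List.set_append, show (r.take (j + 1)).length = j + 1 by simp; omega,
          if_neg (lt_irrefl (j + 1)), Nat.sub_self, List.set_cons_zero]
      have hdd : (r.take (c - 1)).drop j
          = r[j]'(by omega) :: (r.take (c - 1)).drop (j + 1) := by
        rw [List.drop_eq_getElem_cons (by simp; omega)]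
        congr 1
        simp [List.getElem_take]
      rw [hdd]
      simp [List.append_assoc]
    rw [hstep, show ((j + 1 : Nat) : Int) - 1 = (j : Int) by push_cast; ring]
    exact ih (by omega)

-- one execution of A's row-shift body is a rotation
theorem pvRowEval (c : Nat) (hc : 0 < c) (i : Int) (r : List Int) (hr : r.length = c) :
    pvShiftRow (c : Int) i r = r.rotate (if PySem.Int.mod i 2 == 0 then 1 else c - 1) := by
  have hcast : ((c : Int) - 1) = ((c - 1 : Nat) : Int) := by push_cast [hc]; ring
  unfold pvShiftRow
  split
  · -- even: shift left
    rw [hcast, pvEvenFold (c - 1) r (by omega)]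
    rw [PySem.List.pySetD_natCast]
    rw [show PySem.List.pyGetD r 0 0 = r[0]'(by omega) from by
      rw [PySem.List.pyGetD_zero]; exact List.getD_eq_getElem r 0 (by omega)]
    have h1 : (r.drop 1).take (c - 1) = r.drop 1 := List.take_of_length_le (by simp; omega)
    have h2 : r.drop (c - 1) = [r[c - 1]'(by omega)] := by
      rw [List.drop_eq_getElem_cons (by omega), List.drop_eq_nil_of_le (by omega)]
    rw [h1, h2]
    rw [show ((r.drop 1 ++ [r[c - 1]'(by omega)]).set (c - 1) (r[0]'(by omega)))
        = r.drop 1 ++ [r[0]'(by omega)] from by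
      rw [List.set_append, if_neg (by simp; omega), show c - 1 - (r.drop 1).length = 0
        from by simp; omega, List.set_cons_zero]]
    rw [List.rotate_eq_drop_append_take (by omega)]
    congr 1
    rw [List.take_succ_eq_append_getElem (by omega)]
    simp
  · -- odd: shift right
    rw [hcast]
    have hfold := pvOddFold c (c - 1) r hr (by omega)
    rw [show r.take ((c - 1) + 1) ++ (r.take (c - 1)).drop (c - 1) = r from by
      rw [List.drop_of_length_le (by simp), List.take_of_length_le (by omega)]
      simp] at hfold
    rw [hfold]
    rw [show PySem.List.pySetD (r.take 1 ++ r.take (c - 1)) 0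
          (PySem.List.pyGetD r ((c - 1 : Nat) : Int) 0)
        = (r.take 1 ++ r.take (c - 1)).set 0 (PySem.List.pyGetD r ((c - 1 : Nat) : Int) 0)
        from by rw [PySem.List.pySetD_of_nonneg _ _ (le_refl (0 : Int)), Int.toNat_zero]]
    rw [show PySem.List.pyGetD r ((c - 1 : Nat) : Int) 0 = r[c - 1]'(by omega) from by
      rw [PySem.List.pyGetD_natCast, List.getD_eq_getElem _ _ (by omega)]]
    rw [List.take_succ_eq_append_getElem (show 0 < r.length by omega), List.take_zero,
        List.nil_append]
    rw [show (([r[0]'(by omega)] ++ r.take (c - 1)).set 0 (r[c - 1]'(by omega)))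
        = [r[c - 1]'(by omega)] ++ r.take (c - 1) from by
      rw [List.set_append]
      simp]
    rw [List.rotate_eq_drop_append_take (by omega)]
    congr 1
    rw [List.drop_eq_getElem_cons (by omega), List.drop_eq_nil_of_le (by omega)]

theorem pvFoldRows (g : Int → List Int → List Int) (suf pre : List (List Int)) :
    (PySem.List.pyRange (pre.length : Int) ((pre.length : Int) + (suf.length : Int)) 1).foldl
      (fun m row => PySem.List.pySetD m row (g row (PySem.List.pyGetD m row []))) (pre ++ suf)
    = pre ++ pvApplyIdx g (pre.length : Int) suf := by
  induction suf generalizing pre with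
  | nil => simp [PySem.List.pyRange_one_eq_nil, pvApplyIdx]
  | cons r t ih =>
    rw [PySem.List.pyRange_one_cons (by push_cast [List.length_cons]; omega), List.foldl_cons]
    have hstep :
        PySem.List.pySetD (pre ++ r :: t) (pre.length : Int)
          (g (pre.length : Int) (PySem.List.pyGetD (pre ++ r :: t) (pre.length : Int) []))
        = (pre ++ [g (pre.length : Int) r]) ++ t := by
      rw [PySem.List.pySetD_natCast, PySem.List.pyGetD_natCast]
      rw [show (pre ++ r :: t).getD pre.length [] = r from by
        rw [List.getD_eq_getElem?_getD, List.getElem?_append_right (le_refl _)]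
        simp]
      rw [List.set_append]
      simp
    rw [hstep]
    have hrange : PySem.List.pyRange ((pre.length : Int) + 1)
        ((pre.length : Int) + ((r :: t).length : Int)) 1
        = PySem.List.pyRange (((pre ++ [g (pre.length : Int) r]).length : Int))
            ((((pre ++ [g (pre.length : Int) r]).length : Int)) + (t.length : Int)) 1 := by
      simp
      ring_nf
    rw [hrange, ih]
    simp [pvApplyIdx, List.append_assoc]

theorem pvRotIdx_length (K c : Nat) (i : Int) (m : List (List Int)) :
    (pvRotIdx K c i m).length = m.length := by
  induction m generalizing i with
  | nil => rfl
  | cons r t ih => simp [pvRotIdx, ih]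

theorem pvRotIdx_rows (K c : Nat) (i : Int) (m : List (List Int))
    (hm : ∀ r ∈ m, r.length = c) : ∀ x ∈ pvRotIdx K c i m, x.length = c := by
  induction m generalizing i with
  | nil => simp [pvRotIdx]
  | cons r t ih =>
    intro x hx
    rcases List.mem_cons.mp hx with rfl | hx
    · simp [List.length_rotate]
      exact hm r List.mem_cons_self
    · exact ih (i + 1) (fun y hy => hm y (List.mem_cons_of_mem _ hy)) x hx

theorem pvRotIdx_zero (c : Nat) (i : Int) (m : List (List Int)) :
    pvRotIdx 0 c i m = m := by
  induction m generalizing i with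
  | nil => rfl
  | cons r t ih => simp [pvRotIdx, ih]

theorem pvStep (K c : Nat) (hc : 0 < c) (i : Int) (m : List (List Int))
    (hm : ∀ r ∈ m, r.length = c) :
    pvApplyIdx (pvShiftRow (c : Int)) i (pvRotIdx K c i m) = pvRotIdx (K + 1) c i m := by
  induction m generalizing i with
  | nil => rfl
  | cons r t ih =>
    simp only [pvRotIdx, pvApplyIdx, List.cons.injEq]
    refine ⟨?_, ih (i + 1) (fun y hy => hm y (List.mem_cons_of_mem _ hy))⟩
    rw [pvRowEval c hc i _ (by rw [List.length_rotate]; exact hm r List.mem_cons_self)]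
    rw [List.rotate_rotate]
    congr 1
    split <;> ring

theorem pvFoldRows0 (g : Int → List Int → List Int) (m : List (List Int)) :
    (PySem.List.pyRange 0 (m.length : Int) 1).foldl
      (fun m row => PySem.List.pySetD m row (g row (PySem.List.pyGetD m row []))) m
    = pvApplyIdx g 0 m := by
  have h := pvFoldRows g m []
  simpa using h

theorem pvOuter (mat : List (List Int)) (c : Nat) (hc : 0 < c)
    (hrows : ∀ r ∈ mat, r.length = c) (K : Nat) :
    (PySem.List.pyRange 0 (K : Int) 1).foldl (fun m _ =>
      (PySem.List.pyRange 0 (mat.length : Int) 1).foldl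
        (fun m row => PySem.List.pySetD m row (pvShiftRow (c : Int) row (PySem.List.pyGetD m row []))) m) mat
    = pvRotIdx K c 0 mat := by
  induction K with
  | zero => simp [PySem.List.pyRange_one_eq_nil, pvRotIdx_zero]
  | succ K ih =>
    rw [show ((K + 1 : Nat) : Int) = (K : Int) + 1 by push_cast; ring,
        PySem.List.pyRange_one_succ_right (by positivity), List.foldl_append, ih,
        List.foldl_cons, List.foldl_nil]
    rw [show ((mat.length : Nat) : Int) = ((pvRotIdx K c 0 mat).length : Int) by
      rw [pvRotIdx_length]]
    rw [pvFoldRows0 (pvShiftRow (c : Int)) (pvRotIdx K c 0 mat)]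
    exact pvStep K c hc 0 mat hrows

theorem pvModFact (c : Nat) (hc : 0 < c) (K : Nat) :
    (K * (c - 1)) % c = (c - K % c) % c := by
  obtain ⟨q, hq⟩ : ∃ q, K = c * q + K % c := ⟨K / c, by rw [Nat.div_add_mod]⟩
  set s := K % c with hs
  have hslt : s < c := Nat.mod_lt _ hc
  have hexp : K * (c - 1) = c * (q * (c - 1)) + s * (c - 1) := by
    rw [hq]; ring
  rw [hexp, Nat.mul_add_mod]
  rcases Nat.eq_zero_or_pos s with h0 | hpos
  · simp [h0]
  · have h1 : s * (c - 1) = s * c - s := by rw [Nat.mul_sub, mul_one]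
    have h2 : c * (s - 1) = c * s - c := by rw [Nat.mul_sub, mul_one]
    have h3 : s * c = c * s := Nat.mul_comm s c
    have h4 : c ≤ c * s := Nat.le_mul_of_pos_right c hpos
    have h5 : s * (c - 1) = c * (s - 1) + (c - s) := by omega
    rw [h5, Nat.mul_add_mod]

theorem pvRotSelfIff (c : Nat) (hc : 0 < c) (K : Nat) (b : Bool) (r : List Int)
    (hr : r.length = c) :
    (r.rotate (K * (if b then 1 else c - 1)) = r) ↔ (r.rotate (K % c) = r) := by
  subst hr
  cases b
  · -- odd rows: rotate right K times = rotate left K*(c-1)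
    simp only [Bool.false_eq_true, if_false]
    have h1 : r.rotate (K * (r.length - 1)) = r.rotate ((r.length - K % r.length) % r.length) := by
      rw [← List.rotate_mod, pvModFact _ hc]
    rw [h1]
    set s := K % r.length with hs
    have hslt : s < r.length := Nat.mod_lt _ hc
    rcases Nat.eq_zero_or_pos s with h0 | hpos
    · simp [h0, Nat.mod_self]
    · rw [Nat.mod_eq_of_lt (by omega)]
      constructor
      · intro h
        calc r.rotate s = (r.rotate (r.length - s)).rotate s := by rw [h]
          _ = r.rotate ((r.length - s) + s) := List.rotate_rotate _ _ _
          _ = r.rotate r.length := by congr 1; omega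
          _ = r := List.rotate_length r
      · intro h
        calc r.rotate (r.length - s) = (r.rotate s).rotate (r.length - s) := by rw [h]
          _ = r.rotate (s + (r.length - s)) := List.rotate_rotate _ _ _
          _ = r.rotate r.length := by congr 1; omega
          _ = r := List.rotate_length r
  · simp only [if_true, mul_one, List.rotate_mod]

theorem pvRotIdx_eq_self_iff (K c : Nat) (hc : 0 < c) (m : List (List Int)) (i : Int)
    (hm : ∀ r ∈ m, r.length = c) :
    pvRotIdx K c i m = m ↔ ∀ r ∈ m, r.rotate (K % c) = r := by
  induction m generalizing i with
  | nil => simp [pvRotIdx]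
  | cons r t ih =>
    simp only [pvRotIdx, List.cons.injEq, List.mem_cons, forall_eq_or_imp]
    rw [ih (i + 1) (fun x hx => hm x (List.mem_cons_of_mem _ hx)),
        pvRotSelfIff c hc K _ r (hm r List.mem_cons_self)]

-- the final nested comparison loop checks matrix equality
theorem pvAllEq (c : Nat) (M N : List (List Int)) (hLen : M.length = N.length)
    (hM : ∀ r ∈ M, r.length = c) (hN : ∀ r ∈ N, r.length = c) :
    ((PySem.List.pyRange 0 (N.length : Int) 1).all fun i =>
      (PySem.List.pyRange 0 (c : Int) 1).all fun j =>
        PySem.List.pyGetD (PySem.List.pyGetD M i []) j 0 ==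
        PySem.List.pyGetD (PySem.List.pyGetD N i []) j 0) = true ↔ M = N := by
  simp only [List.all_eq_true, PySem.List.mem_pyRange_one, beq_iff_eq]
  constructor
  · intro h
    apply List.ext_getElem hLen
    intro i hi1 hi2
    have hMi : PySem.List.pyGetD M (i : Int) [] = M[i] := by
      rw [PySem.List.pyGetD_natCast, List.getD_eq_getElem _ _ hi1]
    have hNi : PySem.List.pyGetD N (i : Int) [] = N[i] := by
      rw [PySem.List.pyGetD_natCast, List.getD_eq_getElem _ _ hi2]
    apply List.ext_getElem (by rw [hM _ (List.getElem_mem hi1), hN _ (List.getElem_mem hi2)])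
    intro j hj1 hj2
    have hj : j < c := by rw [← hM _ (List.getElem_mem hi1)]; exact hj1
    have := h (i : Int) ⟨by positivity, by exact_mod_cast hi2⟩ (j : Int)
      ⟨by positivity, by exact_mod_cast hj⟩
    rw [hMi, hNi, PySem.List.pyGetD_natCast, PySem.List.pyGetD_natCast,
        List.getD_eq_getElem _ _ hj1, List.getD_eq_getElem _ _ hj2] at this
    exact this
  · rintro rfl
    intro i _ j _
    rfl

-- B accepts exactly the matrices whose rows are fixed by rotation by k % c
theorem pvAltIff (mat : List (List Int)) (k : Int) (h0 : mat ≠ [])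
    (hc : 0 < (mat.headD []).length)
    (hrows : ∀ row ∈ mat, row.length = (mat.headD []).length) (hk : 0 ≤ k) :
    xareSimilar_alt mat k = true ↔
      ∀ r ∈ mat, r.rotate (k.toNat % (mat.headD []).length) = r := by
  obtain ⟨hd, tl, rfl⟩ : ∃ hd tl, mat = hd :: tl := by
    cases mat with
    | nil => exact absurd rfl h0
    | cons hd tl => exact ⟨hd, tl, rfl⟩
  obtain ⟨K, rfl⟩ : ∃ K : Nat, k = (K : Int) := ⟨k.toNat, (Int.toNat_of_nonneg hk).symm⟩
  unfold xareSimilar_alt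
  simp only [PySem.List.pyGetD_zero_cons, PySem.List.len_eq, List.headD_cons,
    Int.toNat_natCast] at *
  rw [PySem.Int.mod_natCast]
  rw [List.all_eq_true]
  apply forall_congr'
  intro r
  apply imp_congr_right
  intro hr
  rw [beq_iff_eq, PySem.List.slice_from_natCast, PySem.List.slice_to_natCast]
  rw [List.rotate_eq_drop_append_take (by
    rw [hrows r hr]
    exact le_of_lt (Nat.mod_lt _ hc))]

-- ===== VERDICT (by name: the statement is the Claim_ definition above) =====
theorem xareSimilar_spec : Claim_equal_xareSimilar := by
  intro mat k _ hPre
  obtain ⟨h0, hc, hrows, hk⟩ := hPre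
  have hBiff := pvAltIff mat k h0 hc hrows hk
  obtain ⟨K, rfl⟩ : ∃ K : Nat, k = (K : Int) := ⟨k.toNat, (Int.toNat_of_nonneg hk).symm⟩
  simp only [Int.toNat_natCast] at hBiff
  have hhead : PySem.List.pyGetD mat 0 [] = mat.headD [] := by
    cases mat with
    | nil => exact absurd rfl h0
    | cons hd tl => exact PySem.List.pyGetD_zero_cons hd tl []
  have hAiff : xareSimilar mat (K : Int) = true ↔
      ∀ r ∈ mat, r.rotate (K % (mat.headD []).length) = r := by
    unfold xareSimilar
    simp only [hhead, PySem.List.len_eq, PySem.List.slice_none_none, List.map_id']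
    rw [pvOuter mat (mat.headD []).length hc hrows K]
    rw [pvAllEq (mat.headD []).length _ mat (pvRotIdx_length _ _ _ _)
      (pvRotIdx_rows _ _ _ _ hrows) hrows]
    exact pvRotIdx_eq_self_iff K (mat.headD []).length hc mat 0 hrows
  unfold Spec_xareSimilar
  by_cases h : ∀ r ∈ mat, r.rotate (K % (mat.headD []).length) = r
  · rw [hAiff.mpr h, hBiff.mpr h]
  · rw [Bool.eq_false_iff.mpr (fun h' => h (hAiff.mp h')),
        Bool.eq_false_iff.mpr (fun h' => h (hBiff.mp h'))]
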